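-- pv_equiv track=rewrite | github.com/jonasleitner/adcgen | adcgen/indices.py | split_idx_string
-- ===== SOURCE A (Python) =====
-- def split_idx_string(str_tosplit: str) -> list[str]:
--     """
--     Splits an index string of the form 'ij12a3b' in a list ['i','j12','a3','b']
--     """
--     splitted = []
--     temp = []
--     for i, idx in enumerate(str_tosplit):
--         temp.append(idx)
--         try:
--             if str_tosplit[i+1].isdigit():
--                 continue
--             else:
--                 splitted.append("".join(temp))
--                 temp.clear()
--         except IndexError:
--             splitted.append("".join(temp))
--     return splitted
-- ===== SOURCE B (Python) =====
-- def split_idx_string(str_tosplit: str) -> list[str]: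
--     """
--     Splits an index string of the form 'ij12a3b' in a list ['i','j12','a3','b']
--     """
--     splitted = []
--     for char in str_tosplit:
--         if char.isdigit() and splitted:
--             splitted[-1] += char
--         else:
--             splitted.append(char)
--     return splitted
-- ===== Notes on version B (the rewrite author's own statement) =====
-- stated objective: simpler
-- what changed: B drops A's next-char lookahead, temp char-buffer, join and try/except IndexError: it folds left over the characters, extending the last token in place when the char is a digit and starting a new token otherwise.
import Mathlib
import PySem

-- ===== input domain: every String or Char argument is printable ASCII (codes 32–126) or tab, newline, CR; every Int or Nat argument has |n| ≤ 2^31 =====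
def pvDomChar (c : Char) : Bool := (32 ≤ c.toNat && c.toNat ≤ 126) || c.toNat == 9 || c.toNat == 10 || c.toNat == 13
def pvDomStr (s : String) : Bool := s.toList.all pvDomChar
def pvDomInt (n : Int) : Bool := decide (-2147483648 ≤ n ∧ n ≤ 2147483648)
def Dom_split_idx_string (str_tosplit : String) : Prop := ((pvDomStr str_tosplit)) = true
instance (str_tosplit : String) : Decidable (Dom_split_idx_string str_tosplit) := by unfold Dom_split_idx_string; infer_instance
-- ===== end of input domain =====

-- B replaces A's next-char lookahead + temp buffer + try/except with a single left fold
-- that extends the last token on a digit; objective: simpler.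


-- ===== PORT A =====
-- A's loop over enumerate(str_tosplit) with the lookahead str_tosplit[i+1]: when the loop
-- is at char c with remaining suffix rest, str_tosplit[i+1] is exactly rest.head?
-- (i+1 ≥ 0, so no negative indexing arises); head? = none is the IndexError branch,
-- where A appends "".join(temp) WITHOUT clearing temp (faithful: temp kept).
def splitIdxGo (temp : List Char) (splitted : List String) : List Char → List String
  | [] => splitted
  | c :: rest =>
    let temp := temp ++ [c]
    match rest.head? with
    | some d =>
      if PySem.Chars.isdigit d then splitIdxGo temp splitted rest
      else splitIdxGo [] (splitted ++ [String.ofList temp]) rest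
    | none => splitIdxGo temp (splitted ++ [String.ofList temp]) rest

def split_idx_string (str_tosplit : String) : List String :=
  splitIdxGo [] [] str_tosplit.toList

-- ===== PORT B =====
-- one fold step: digit and non-empty result → splitted[-1] += char, else append [char]
def splitIdxStep (splitted : List String) (c : Char) : List String :=
  if PySem.Chars.isdigit c && !splitted.isEmpty then
    splitted.dropLast ++ [splitted.getLastD "" ++ String.ofList [c]]
  else splitted ++ [String.ofList [c]]

def split_idx_string_alt (str_tosplit : String) : List String :=
  str_tosplit.toList.foldl splitIdxStep []

-- ===== PRECONDITION & SPEC =====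
def Spec_split_idx_string (str_tosplit : String) (out : List String) : Prop := out = split_idx_string_alt str_tosplit
instance (str_tosplit : String) (out : List String) : Decidable (Spec_split_idx_string str_tosplit out) := by unfold Spec_split_idx_string; infer_instance

-- ===== CLAIM (what is proved, stated in full; the proofs are below) =====
def Claim_equal_split_idx_string : Prop := ∀ (str_tosplit : String), Dom_split_idx_string str_tosplit → Spec_split_idx_string str_tosplit (split_idx_string str_tosplit)

-- ===== LEMMAS AND PROOFS =====

-- Loop invariant: A's state (temp, splitted) corresponds to B's accumulator
-- splitted ++ (the pending token, if any); the hypotheses tie the state to the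
-- head of the remaining input: a non-empty temp means the current char is a digit
-- (it was the previous iteration's digit lookahead), and a digit current char with
-- empty temp can only happen at the very start (splitted = []).
theorem splitIdxGo_eq_foldl :
    ∀ (rest temp : List Char) (splitted : List String),
      (rest = [] → temp = []) →
      (∀ c r, rest = c :: r →
        (temp ≠ [] → PySem.Chars.isdigit c = true) ∧
        (PySem.Chars.isdigit c = true → temp = [] → splitted = [])) →
      splitIdxGo temp splitted rest =
        List.foldl splitIdxStep
          (splitted ++ (if temp = [] then [] else [String.ofList temp])) rest := by
  intro rest
  induction rest with
  | nil =>
    intro temp splitted hnil _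
    simp [splitIdxGo, hnil rfl]
  | cons c r ih =>
    intro temp splitted _ hhead
    obtain ⟨hd, hs⟩ := hhead c r rfl
    -- B's first step produces splitted ++ [String.ofList (temp ++ [c])]
    have hstep : splitIdxStep
        (splitted ++ (if temp = [] then [] else [String.ofList temp])) c
        = splitted ++ [String.ofList (temp ++ [c])] := by
      by_cases ht : temp = []
      · subst ht
        by_cases hdig : PySem.Chars.isdigit c = true
        · have : splitted = [] := hs hdig rfl
          subst this
          simp [splitIdxStep]
        · simp [splitIdxStep, hdig]
      · have hdig := hd ht
        have hE : (splitted ++ [String.ofList temp]).isEmpty = false := by simp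
        simp only [if_neg ht, splitIdxStep, hdig, hE, Bool.not_false, Bool.and_self, if_true,
          List.dropLast_concat, List.getLastD_concat]
        simp
    cases r with
    | nil =>
      have unf : splitIdxGo temp splitted [c] =
          splitIdxGo (temp ++ [c]) (splitted ++ [String.ofList (temp ++ [c])]) [] := rfl
      rw [unf, List.foldl_cons, hstep]
      simp [splitIdxGo]
    | cons d r' =>
      rw [List.foldl_cons, hstep]
      by_cases hdig : PySem.Chars.isdigit d = true
      · have unf : splitIdxGo temp splitted (c :: d :: r') =
            splitIdxGo (temp ++ [c]) splitted (d :: r') := by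
          show (if PySem.Chars.isdigit d = true then splitIdxGo (temp ++ [c]) splitted (d :: r')
            else splitIdxGo [] (splitted ++ [String.ofList (temp ++ [c])]) (d :: r')) = _
          rw [if_pos hdig]
        rw [unf, ih (temp ++ [c]) splitted (by simp)
          (by
            intro c' r'' h
            injection h with h1 h2; subst h1; subst h2
            exact ⟨fun _ => hdig, fun _ h => by simp at h⟩)]
        simp
      · have unf : splitIdxGo temp splitted (c :: d :: r') =
            splitIdxGo [] (splitted ++ [String.ofList (temp ++ [c])]) (d :: r') := by
          show (if PySem.Chars.isdigit d = true then splitIdxGo (temp ++ [c]) splitted (d :: r')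
            else splitIdxGo [] (splitted ++ [String.ofList (temp ++ [c])]) (d :: r')) = _
          rw [if_neg hdig]
        rw [unf, ih [] (splitted ++ [String.ofList (temp ++ [c])]) (fun _ => rfl)
          (by
            intro c' r'' h
            injection h with h1 h2; subst h1; subst h2
            exact ⟨fun h => absurd rfl h, fun h _ => absurd h hdig⟩)]
        simp

-- ===== VERDICT (by name: the statement is the Claim_ definition above) =====
theorem split_idx_string_spec : Claim_equal_split_idx_string := by
  intro s _
  unfold Spec_split_idx_string split_idx_string split_idx_string_alt
  rw [splitIdxGo_eq_foldl s.toList [] [] (fun _ => rfl)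
    (by intro c r _; exact ⟨fun h => absurd rfl h, fun _ _ => rfl⟩)]
  simp
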